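-- pv_equiv track=rewrite | github.com/yezhuoyang/HALO | halo.py | redistribute_job_result
-- ===== SOURCE A (Python) =====
-- from typing import Dict, List, Optional, Set, Tuple
--
-- def redistribute_job_result(measurement_to_process_map: Dict[int, int], raw_result: Dict[str, int]) -> Dict[int, Dict[str, int]]:
--     """
--     Redistribute the raw result to process output.
--
--     For example, if the count result from hardware is:
--     {
--         "00": 500,
--         "01": 300,
--         "10": 200
--     }
--     Where the first bit(Reverse order) belongs to process 1, and the second bit(Reverse order) belongs to process 2.
--     Then the ouput is:
--     {
--         process_id_1: {"0": 700, "1": 300},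
--         process_id_2: {"0": 800, "1": 200}
--     }
--
--
--     When count result from hardware is:
--     {
--         "001": 500,
--         "010": 300,
--         "101": 200
--     }
--     Where the first two bits(Reverse order) belongs to process 1, and the third bit(Reverse order) belongs to process 2.
--     Then the ouput is:
--     {
--         process_id_1: {"01": 500, "10": 300,"01":200},
--         process_id_2: {"0": 800, "1": 200}
--     }
--
--
--     Input:
--         raw_result: Any
--             The raw result returned from IBMQ or simulator
--     """
--     redistributed_result = {}
--     for bitstring, count in raw_result.items():
--         # Reverse the bitstring to match measurement order
--         bitstring = bitstring[::-1]
--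
--         """
--         First, we get the distributed set of bitstrings for all processes
--         """
--         proc_string_map = {}
--         for meas_index, proc_id in measurement_to_process_map.items():
--             if proc_id not in proc_string_map:
--                 proc_string_map[proc_id] = bitstring[meas_index]
--             else:
--                 proc_string_map[proc_id] += bitstring[meas_index]
--         """
--         Reverse the bitstring for each process to match the original order
--         """
--         for proc_id in proc_string_map:
--             proc_string_map[proc_id] = proc_string_map[proc_id][::-1]
--         """
--         Update the count for each process
--         """
--         for proc_id, proc_bitstring in proc_string_map.items():
--             if proc_id not in redistributed_result:
--                 redistributed_result[proc_id] = {}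
--             if proc_bitstring not in redistributed_result[proc_id]:
--                 redistributed_result[proc_id][proc_bitstring] = count
--             else:
--                 redistributed_result[proc_id][proc_bitstring] += count
--
--
--     return redistributed_result
-- ===== SOURCE B (Python) =====
-- def redistribute_job_result(measurement_to_process_map, raw_result):
--     # Invert the map once: proc_id -> list of measurement indices, in map order.
--     index_table = {}
--     for meas_index, proc_id in measurement_to_process_map.items():
--         index_table[proc_id] = index_table.get(proc_id, []) + [meas_index]
--
--     redistributed_result = {}
--     for bitstring, count in raw_result.items():
--         rbs = bitstring[::-1]
--         for proc_id, idxs in index_table.items():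
--             sub = ''.join(rbs[i] for i in reversed(idxs))
--             bucket = redistributed_result.get(proc_id, {})
--             bucket[sub] = bucket.get(sub, 0) + count
--             redistributed_result[proc_id] = bucket
--     return redistributed_result
-- ===== Notes on version B (the rewrite author's own statement) =====
-- stated objective: alternative
-- what changed: B inverts measurement_to_process_map once into a proc_id -> measurement-index table before the bitstring loop and extracts each process substring by direct indexing (join over reversed indices), instead of A's rebuilding of the whole proc->string grouping dict (with its separate value-reversal pass) for every bitstring.
import Mathlib
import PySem

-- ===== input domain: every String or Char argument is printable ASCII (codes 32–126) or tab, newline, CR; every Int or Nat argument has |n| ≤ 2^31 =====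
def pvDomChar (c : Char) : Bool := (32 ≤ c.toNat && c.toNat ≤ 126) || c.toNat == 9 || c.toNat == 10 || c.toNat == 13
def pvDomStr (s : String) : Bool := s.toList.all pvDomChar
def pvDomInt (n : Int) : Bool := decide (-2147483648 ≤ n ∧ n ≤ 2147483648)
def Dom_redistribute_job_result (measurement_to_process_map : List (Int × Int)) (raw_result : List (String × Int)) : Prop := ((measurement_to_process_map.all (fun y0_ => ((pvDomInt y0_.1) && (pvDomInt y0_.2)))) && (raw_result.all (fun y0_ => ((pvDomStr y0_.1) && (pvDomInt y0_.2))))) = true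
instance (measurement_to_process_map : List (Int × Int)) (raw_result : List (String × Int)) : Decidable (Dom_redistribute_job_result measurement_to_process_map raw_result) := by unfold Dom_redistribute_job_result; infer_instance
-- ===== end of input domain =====

-- B replaces A's per-bitstring regrouping loop by an index table (proc_id -> measurement indices)
-- built once before the bitstring loop; same return value (objective: alternative decomposition).

-- ===== PORT A =====
-- per-bitstring inner loop of A: build proc_string_map (proc strings as List Char; rbs = reversed bitstring)
def pvAProcMap (rbs : List Char) (mp : List (Int × Int)) : PySem.Dict Int (List Char) :=
  mp.foldl (fun psm q =>
    if psm.contains q.2 = false then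
      psm.insert q.2 [PySem.List.pyGetD rbs q.1 '?']          -- bitstring[meas_index]; Pre_ excludes IndexError
    else
      psm.insert q.2 (psm.getD q.2 [] ++ [PySem.List.pyGetD rbs q.1 '?'])) PySem.Dict.empty

-- A's "reverse each value" loop: for proc_id in proc_string_map: proc_string_map[proc_id] = …[::-1]
def pvARev (psm : PySem.Dict Int (List Char)) : PySem.Dict Int (List Char) :=
  psm.keys.foldl (fun d k => d.insert k ((d.getD k []).reverse)) psm

-- A's count-update loop body for one (proc_id, proc_bitstring) pair
def pvAUpd (count : Int) (red : PySem.Dict Int (PySem.Dict String Int)) (p : Int × List Char) :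
    PySem.Dict Int (PySem.Dict String Int) :=
  let red1 := if red.contains p.1 = false then red.insert p.1 PySem.Dict.empty else red
  let inner := red1.getD p.1 PySem.Dict.empty
  let key := String.ofList p.2
  let inner1 := if inner.contains key = false then inner.insert key count
                else inner.insert key (inner.getD key 0 + count)
  red1.insert p.1 inner1

def redistribute_job_result (measurement_to_process_map : List (Int × Int)) (raw_result : List (String × Int)) : List (Int × List (String × Int)) :=
  let red := (PySem.Dict.ofList raw_result).items.foldl (fun red bc =>
    let rbs := bc.1.toList.reverse                             -- bitstring[::-1] (exact: full reversal)
    let psm := pvAProcMap rbs measurement_to_process_map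
    let psm2 := pvARev psm
    psm2.items.foldl (pvAUpd bc.2) red) PySem.Dict.empty
  red.items.map (fun p => (p.1, p.2.items))

-- ===== PORT B =====
-- B's one-time inversion: index_table[proc_id] = index_table.get(proc_id, []) + [meas_index]
def pvBTable (mp : List (Int × Int)) : PySem.Dict Int (List Int) :=
  mp.foldl (fun t q => t.insert q.2 (t.getD q.2 [] ++ [q.1])) PySem.Dict.empty

-- B's count-update for one (proc_id, idxs) pair of the table
def pvBUpd (rbs : List Char) (count : Int) (red : PySem.Dict Int (PySem.Dict String Int))
    (p : Int × List Int) : PySem.Dict Int (PySem.Dict String Int) :=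
  let sub := String.ofList (p.2.reverse.map (fun i => PySem.List.pyGetD rbs i '?'))   -- ''.join(rbs[i] for i in reversed(idxs))
  let bucket := red.getD p.1 PySem.Dict.empty
  red.insert p.1 (bucket.insert sub (bucket.getD sub 0 + count))

def redistribute_job_result_alt (measurement_to_process_map : List (Int × Int)) (raw_result : List (String × Int)) : List (Int × List (String × Int)) :=
  let table := pvBTable measurement_to_process_map
  let red := (PySem.Dict.ofList raw_result).items.foldl (fun red bc =>
    let rbs := bc.1.toList.reverse                             -- bitstring[::-1]
    table.items.foldl (pvBUpd rbs bc.2) red) PySem.Dict.empty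
  red.items.map (fun p => (p.1, p.2.items))

-- ===== PRECONDITION & SPEC =====
-- Pre_ excludes exactly the inputs where A raises IndexError: some measurement index out of
-- range (Python indexing, negative wraparound allowed) for some bitstring of raw_result.
def Pre_redistribute_job_result (measurement_to_process_map : List (Int × Int)) (raw_result : List (String × Int)) : Prop :=
  ∀ p ∈ raw_result, ∀ q ∈ measurement_to_process_map,
    -(p.1.toList.length : Int) ≤ q.1 ∧ q.1 < (p.1.toList.length : Int)
instance (measurement_to_process_map : List (Int × Int)) (raw_result : List (String × Int)) : Decidable (Pre_redistribute_job_result measurement_to_process_map raw_result) := by unfold Pre_redistribute_job_result; infer_instance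

def pvWitness_redistribute_job_result : (List (Int × Int)) × (List (String × Int)) :=
  ([(0, 1), (1, 2), (2, 1)], [("001", 500), ("010", 300), ("101", 200)])

def Spec_redistribute_job_result (measurement_to_process_map : List (Int × Int)) (raw_result : List (String × Int)) (out : List (Int × List (String × Int))) : Prop := out = redistribute_job_result_alt measurement_to_process_map raw_result
instance (measurement_to_process_map : List (Int × Int)) (raw_result : List (String × Int)) (out : List (Int × List (String × Int))) : Decidable (Spec_redistribute_job_result measurement_to_process_map raw_result out) := by unfold Spec_redistribute_job_result; infer_instance

-- ===== CLAIM (what is proved, stated in full; the proofs are below) =====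
def Claim_equal_redistribute_job_result : Prop := ∀ (measurement_to_process_map : List (Int × Int)) (raw_result : List (String × Int)), Dom_redistribute_job_result measurement_to_process_map raw_result → Pre_redistribute_job_result measurement_to_process_map raw_result → Spec_redistribute_job_result measurement_to_process_map raw_result (redistribute_job_result measurement_to_process_map raw_result)

-- ===== LEMMAS AND PROOFS =====

-- values of a dict mapped pointwise (proof-only helper relating A's grouped strings to B's index table)
def pvMapVal {κ ν ν' : Type} (f : ν → ν') (d : PySem.Dict κ ν) : PySem.Dict κ ν' :=
  PySem.Dict.mk (d.items.map (fun p => (p.1, f p.2)))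

theorem pvMapVal_contains {κ ν ν' : Type} [BEq κ] (f : ν → ν') (d : PySem.Dict κ ν) (k : κ) :
    (pvMapVal f d).contains k = d.contains k := by
  simp [pvMapVal, PySem.Dict.contains, List.any_map, Function.comp_def]

theorem pvMapVal_insert {κ ν ν' : Type} [BEq κ] (f : ν → ν') (d : PySem.Dict κ ν) (k : κ) (v : ν) :
    pvMapVal f (d.insert k v) = (pvMapVal f d).insert k (f v) := by
  have hc := pvMapVal_contains f d k
  by_cases h : d.contains k = true
  · simp only [PySem.Dict.insert, hc, h, if_pos]
    unfold pvMapVal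
    simp only [List.map_map]
    congr 1
    apply List.map_congr_left
    intro p _
    by_cases hp : (p.1 == k) = true <;> simp [hp]
  · have h' : d.contains k = false := Bool.eq_false_iff.mpr h
    simp only [PySem.Dict.insert, hc, h', Bool.false_eq_true, if_neg, not_false_iff]
    unfold pvMapVal
    simp

theorem pvMapVal_get? {κ ν ν' : Type} [BEq κ] (f : ν → ν') (d : PySem.Dict κ ν) (k : κ) :
    (pvMapVal f d).get? k = (d.get? k).map f := by
  rcases d with ⟨l⟩
  induction l with
  | nil => simp [pvMapVal, PySem.Dict.get?]
  | cons p l ih =>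
    simp only [pvMapVal, List.map_cons] at ih ⊢
    rw [PySem.Dict.get?_mk_cons, PySem.Dict.get?_mk_cons]
    by_cases hp : (p.1 == k) = true
    · simp [hp]
    · simpa [hp] using ih

theorem pvMapVal_getD {κ ν ν' : Type} [BEq κ] (f : ν → ν') (d : PySem.Dict κ ν) (k : κ) (dflt : ν) :
    (pvMapVal f d).getD k (f dflt) = f (d.getD k dflt) := by
  simp only [PySem.Dict.getD, pvMapVal_get?]
  cases d.get? k <;> simp

theorem pvMapVal_keys {κ ν ν' : Type} (f : ν → ν') (d : PySem.Dict κ ν) :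
    (pvMapVal f d).keys = d.keys := by
  simp [pvMapVal, PySem.Dict.keys, List.map_map, Function.comp]

-- A's grouping fold equals B's index table with each index list mapped to its characters
theorem pvProcMap_eq_mapVal (rbs : List Char) (mp : List (Int × Int)) :
    pvAProcMap rbs mp = pvMapVal (List.map (fun i => PySem.List.pyGetD rbs i '?')) (pvBTable mp) := by
  unfold pvAProcMap pvBTable
  set g := fun i => PySem.List.pyGetD rbs i '?' with hg
  have : ∀ (l : List (Int × Int)) (d : PySem.Dict Int (List Int)),
      l.foldl (fun psm q =>
        if psm.contains q.2 = false then psm.insert q.2 [g q.1]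
        else psm.insert q.2 (psm.getD q.2 [] ++ [g q.1])) (pvMapVal (List.map g) d)
      = pvMapVal (List.map g) (l.foldl (fun t q => t.insert q.2 (t.getD q.2 [] ++ [q.1])) d) := by
    intro l
    induction l with
    | nil => intro d; rfl
    | cons q l ih =>
      intro d
      simp only [List.foldl_cons]
      rw [← ih (d.insert q.2 (d.getD q.2 [] ++ [q.1]))]
      congr 1
      rw [pvMapVal_insert]
      by_cases h : d.contains q.2
      · have : (pvMapVal (List.map g) d).contains q.2 = true := by
          rw [pvMapVal_contains]; exact h
        simp only [this]
        rw [if_neg (by simp)]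
        have hget := pvMapVal_getD (List.map g) d q.2 []
        simp only [List.map_nil] at hget
        rw [hget]
        simp
      · have hc : (pvMapVal (List.map g) d).contains q.2 = false := by
          rw [pvMapVal_contains]; exact Bool.eq_false_iff.mpr h
        simp only [hc]
        simp only [if_true]
        have hd : d.getD q.2 [] = [] := PySem.Dict.getD_of_not_contains d [] (Bool.eq_false_iff.mpr h)
        rw [hd]
        simp
  have h0 := this mp PySem.Dict.empty
  simpa [pvMapVal] using h0

-- folding value-rewrites over the dict's own (Nodup) keys rewrites every value in place
theorem pvFold_rewrite_keys {κ ν : Type} [BEq κ] [LawfulBEq κ] (h : ν → ν) (dflt : ν) :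
    ∀ (ks : List κ) (d : PySem.Dict κ ν), d.keys.Nodup → ks.Nodup →
      (∀ k ∈ ks, d.contains k = true) →
      ks.foldl (fun d k => d.insert k (h (d.getD k dflt))) d
        = PySem.Dict.mk (d.items.map (fun p => if p.1 ∈ ks then (p.1, h p.2) else p)) := by
  intro ks
  induction ks with
  | nil => intro d _ _ _; simp
  | cons k ks ih =>
    intro d hnd hks hct
    have hck : d.contains k = true := hct k (by simp)
    simp only [List.foldl_cons]
    have hkeys : (d.insert k (h (d.getD k dflt))).keys = d.keys :=
      PySem.Dict.keys_insert_of_contains d _ hck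
    rw [ih (d.insert k (h (d.getD k dflt)))
        (by rw [hkeys]; exact hnd) (List.nodup_cons.mp hks).2
        (by intro k' hk'
            rw [PySem.Dict.contains_insert]
            simp [hct k' (by simp [hk'])])]
    rw [PySem.Dict.items_insert_of_contains d _ hck]
    congr 1
    rw [List.map_map]
    apply List.map_congr_left
    intro p hp
    by_cases hpk : p.1 = k
    · have hknotin : k ∉ ks := (List.nodup_cons.mp hks).1
      subst hpk
      have hv : d.getD p.1 dflt = p.2 := by
        rcases p with ⟨k1, v1⟩
        exact PySem.Dict.getD_of_mem_items d hp hnd dflt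
      simp [hknotin, hv]
    · simp [hpk, beq_iff_eq]

-- A's reversal loop is a pointwise value map (given Nodup keys)
theorem pvARev_eq_mapVal (psm : PySem.Dict Int (List Char)) (hnd : psm.keys.Nodup) :
    pvARev psm = pvMapVal List.reverse psm := by
  unfold pvARev
  rw [pvFold_rewrite_keys List.reverse [] psm.keys psm hnd hnd
      (fun k hk => (PySem.Dict.contains_iff_mem_keys psm k).mpr hk)]
  unfold pvMapVal
  congr 1
  apply List.map_congr_left
  intro p hp
  have : p.1 ∈ psm.keys := PySem.Dict.mem_keys_of_mem_items psm hp
  simp [this]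

-- one count-update step of A at a mapped pair equals B's step
theorem pvUpd_step (rbs : List Char) (count : Int) (red : PySem.Dict Int (PySem.Dict String Int))
    (p : Int × List Int) :
    pvAUpd count red (p.1, (p.2.map (fun i => PySem.List.pyGetD rbs i '?')).reverse)
      = pvBUpd rbs count red p := by
  unfold pvAUpd pvBUpd
  simp only [← List.map_reverse]
  by_cases h : red.contains p.1 = true
  · rw [if_neg (by simp [h])]
    set key := String.ofList (p.2.reverse.map fun i => PySem.List.pyGetD rbs i '?') with hkey
    by_cases h2 : (red.getD p.1 PySem.Dict.empty).contains key = true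
    · simp [h2]
    · have h2' := Bool.eq_false_iff.mpr h2
      have hz : (red.getD p.1 PySem.Dict.empty).getD key 0 = 0 :=
        PySem.Dict.getD_of_not_contains _ 0 h2'
      simp [h2', hz]
  · have hc : red.contains p.1 = false := Bool.eq_false_iff.mpr h
    rw [if_pos hc]
    rw [PySem.Dict.getD_insert_self, PySem.Dict.getD_of_not_contains red _ hc]
    rw [if_pos (PySem.Dict.contains_empty _)]
    rw [PySem.Dict.insert_insert_self]
    simp

-- the table built by B has Nodup keys
theorem pvBTable_nodup (mp : List (Int × Int)) : (pvBTable mp).keys.Nodup := by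
  unfold pvBTable
  exact PySem.Dict.nodup_keys_foldl_insert_key mp (fun q => q.2)
    (fun t q => t.getD q.2 [] ++ [q.1]) PySem.Dict.empty (by simp)

-- ===== VERDICT (by name: the statement is the Claim_ definition above) =====
theorem redistribute_job_result_spec : Claim_equal_redistribute_job_result := by
  intro mp raw _ _
  unfold Spec_redistribute_job_result redistribute_job_result redistribute_job_result_alt
  dsimp only
  congr 1
  congr 1
  apply List.foldl_ext
  intro red bc _
  have hmap := pvProcMap_eq_mapVal bc.1.toList.reverse mp
  have hnd : (pvAProcMap bc.1.toList.reverse mp).keys.Nodup := by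
    rw [hmap, pvMapVal_keys]; exact pvBTable_nodup mp
  rw [pvARev_eq_mapVal _ hnd, hmap]
  have : pvMapVal List.reverse
      (pvMapVal (List.map fun i => PySem.List.pyGetD bc.1.toList.reverse i '?') (pvBTable mp))
      = pvMapVal (fun v => (v.map fun i => PySem.List.pyGetD bc.1.toList.reverse i '?').reverse)
          (pvBTable mp) := by
    simp [pvMapVal, List.map_map, Function.comp]
  rw [this]
  show ((pvMapVal _ (pvBTable mp)).items).foldl (pvAUpd bc.2) red
      = ((pvBTable mp).items).foldl (pvBUpd bc.1.toList.reverse bc.2) red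
  unfold pvMapVal
  rw [List.foldl_map]
  apply List.foldl_ext
  intro red' p _
  exact pvUpd_step bc.1.toList.reverse bc.2 red' p
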